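-- pv_equiv track=rewrite | github.com/arunnats/s7-nlp | entailment_models/generate_entailment_data.py | find_related_categories
-- ===== SOURCE A (Python) =====
-- from typing import List, Dict
--
-- def find_related_categories(target_category: str, all_categories: List[str]) -> List[str]:
--     """
--     Find categories related to target by checking bigram overlap
--     Paper: categories that share word bigrams are considered related
--     """
--     target_bigrams = set(zip(target_category.split()[:-1],
--                              target_category.split()[1:]))
--     related = []
--
--     for cat in all_categories:
--         if cat == target_category:
--             continue
--         cat_bigrams = set(zip(cat.split()[:-1], cat.split()[1:]))
--         if target_bigrams & cat_bigrams:  # If any bigrams overlap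
--             related.append(cat)
--
--     return related if related else all_categories[:10]  # Fallback to first 10
-- ===== SOURCE B (Python) =====
-- from typing import List
--
-- def find_related_categories(target_category: str, all_categories: List[str]) -> List[str]:
--     # Inverted index: bigram -> set of category positions; then one lookup pass.
--     tw = target_category.split()
--     target_bigrams = set(zip(tw, tw[1:]))
--     index = {}
--     for i, cat in enumerate(all_categories):
--         cw = cat.split()
--         for p in zip(cw, cw[1:]):
--             index.setdefault(p, set()).add(i)
--     hit = set()
--     for p in target_bigrams:
--         hit |= index.get(p, set())
--     related = [cat for i, cat in enumerate(all_categories)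
--                if i in hit and cat != target_category]
--     return related if related else all_categories[:10]
-- ===== Notes on version B (the rewrite author's own statement) =====
-- stated objective: alternative
-- what changed: B builds an inverted index (bigram -> set of category positions) in one pass, unions the index entries of the target's bigrams into a hit set, and emits categories whose position is in the hit set, instead of A's per-category bigram-set intersection with the target.
import Mathlib
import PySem

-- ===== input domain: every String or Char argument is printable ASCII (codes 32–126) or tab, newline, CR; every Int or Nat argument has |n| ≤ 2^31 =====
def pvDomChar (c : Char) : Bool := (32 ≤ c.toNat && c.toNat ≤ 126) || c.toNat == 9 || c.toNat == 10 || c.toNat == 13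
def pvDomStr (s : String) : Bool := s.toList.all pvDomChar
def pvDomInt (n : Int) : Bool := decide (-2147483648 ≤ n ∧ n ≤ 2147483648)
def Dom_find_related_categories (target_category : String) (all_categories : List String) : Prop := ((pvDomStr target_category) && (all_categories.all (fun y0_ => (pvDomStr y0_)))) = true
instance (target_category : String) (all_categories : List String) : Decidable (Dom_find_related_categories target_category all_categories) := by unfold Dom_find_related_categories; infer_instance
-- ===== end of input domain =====

-- B replaces A's per-category bigram-set intersection by an inverted index (bigram -> set of positions) queried once per target bigram; objective: alternative (same cost, different data structure).

-- ===== PORT A =====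
-- set(zip(s.split()[:-1], s.split()[1:])) — the bigram set A builds for the target and for each category
def pvBigramsA (s : String) : PySem.Set (String × String) :=
  PySem.Set.ofList (List.zip
    (PySem.List.slice (PySem.Str.split₀ s) none (some (-1)))
    (PySem.List.slice (PySem.Str.split₀ s) (some 1) none))

def find_related_categories (target_category : String) (all_categories : List String) : List String :=
  let target_bigrams := pvBigramsA target_category
  let related : List String := all_categories.foldl (fun related cat =>
    if cat = target_category then related
    else if PySem.Set.inter target_bigrams (pvBigramsA cat) ≠ [] then related ++ [cat]
    else related) []
  if related ≠ [] then related else PySem.List.slice all_categories none (some 10)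

-- ===== PORT B =====
-- zip(cw, cw[1:]) — B's bigram list of a string (zip truncates, no [:-1] needed)
def pvBigramsB (s : String) : List (String × String) :=
  let cw := PySem.Str.split₀ s
  List.zip cw (PySem.List.slice cw (some 1) none)

-- body of B's outer index-building loop: index.setdefault(p, set()).add(i) for each bigram p of cat
def pvIndexStep (index : PySem.Dict (String × String) (PySem.Set Int)) (p : Int × String) :
    PySem.Dict (String × String) (PySem.Set Int) :=
  (pvBigramsB p.2).foldl (fun index bg =>
    index.modify bg PySem.Set.empty (fun s => PySem.Set.add s p.1)) index

-- the inverted index over enumerate(all_categories)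
def pvIndex (all_categories : List String) : PySem.Dict (String × String) (PySem.Set Int) :=
  (PySem.List.enumerate all_categories 0).foldl pvIndexStep PySem.Dict.empty

-- hit = union of index entries of the target's bigrams
def pvHit (target_category : String) (all_categories : List String) : PySem.Set Int :=
  (PySem.Set.ofList (pvBigramsB target_category)).foldl
    (fun hit bg => PySem.Set.union hit ((pvIndex all_categories).getD bg PySem.Set.empty))
    PySem.Set.empty

def find_related_categories_alt (target_category : String) (all_categories : List String) : List String :=
  let hit := pvHit target_category all_categories
  let related : List String := (PySem.List.enumerate all_categories 0).foldl (fun related p =>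
    if p.1 ∈ hit ∧ p.2 ≠ target_category then related ++ [p.2] else related) []
  if related ≠ [] then related else PySem.List.slice all_categories none (some 10)

-- ===== PRECONDITION & SPEC =====
def Spec_find_related_categories (target_category : String) (all_categories : List String) (out : List String) : Prop := out = find_related_categories_alt target_category all_categories
instance (target_category : String) (all_categories : List String) (out : List String) : Decidable (Spec_find_related_categories target_category all_categories out) := by unfold Spec_find_related_categories; infer_instance

-- ===== CLAIM (what is proved, stated in full; the proofs are below) =====
def Claim_equal_find_related_categories : Prop := ∀ (target_category : String) (all_categories : List String), Dom_find_related_categories target_category all_categories → Spec_find_related_categories target_category all_categories (find_related_categories target_category all_categories)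

-- ===== LEMMAS AND PROOFS =====

-- canonical bigram list of a string
def pvBg (s : String) : List (String × String) :=
  (PySem.Str.split₀ s).zip (PySem.Str.split₀ s).tail

-- the common membership predicate both loops realise
def pvP (t c : String) : Bool := decide (c ≠ t ∧ ∃ b ∈ pvBg t, b ∈ pvBg c)

theorem pv_zip_dropLast_tail {α : Type} : ∀ (ws : List α), ws.dropLast.zip ws.tail = ws.zip ws.tail
  | [] => rfl
  | [_] => rfl
  | x :: y :: l => by
    have ih := pv_zip_dropLast_tail (y :: l)
    simp only [List.tail_cons] at ih
    simp only [List.dropLast_cons₂, List.zip_cons_cons, List.tail_cons, ih]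

theorem pvBigramsB_eq (s : String) : pvBigramsB s = pvBg s := by
  simp only [pvBigramsB, pvBg, PySem.List.slice_from_one]

theorem mem_pvBigramsA (b : String × String) (s : String) : b ∈ pvBigramsA s ↔ b ∈ pvBg s := by
  unfold pvBigramsA
  rw [PySem.List.slice_to_neg_one, PySem.List.slice_from_one, pv_zip_dropLast_tail,
    PySem.Set.mem_ofList]
  rfl

theorem pv_inter_ne_nil {α : Type} [BEq α] [LawfulBEq α] (s t : PySem.Set α) :
    PySem.Set.inter s t ≠ [] ↔ ∃ b ∈ s, b ∈ t := by
  constructor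
  · intro h
    obtain ⟨x, hx⟩ := List.exists_mem_of_ne_nil _ h
    exact ⟨x, (PySem.Set.mem_inter s t x).1 hx⟩
  · rintro ⟨b, hb1, hb2⟩ h
    have := (PySem.Set.mem_inter s t b).2 ⟨hb1, hb2⟩
    rw [h] at this
    exact absurd this (List.not_mem_nil)

theorem pvA_loop (t : String) (cats : List String) :
    cats.foldl (fun related cat =>
      if cat = t then related
      else if PySem.Set.inter (pvBigramsA t) (pvBigramsA cat) ≠ [] then related ++ [cat]
      else related) [] = cats.filter (pvP t) := by
  have hstep : (fun (related : List String) cat =>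
      if cat = t then related
      else if PySem.Set.inter (pvBigramsA t) (pvBigramsA cat) ≠ [] then related ++ [cat]
      else related)
      = fun related cat => if pvP t cat = true then related ++ [id cat] else related := by
    funext related cat
    by_cases h1 : cat = t
    · simp [h1, pvP]
    · by_cases h2 : PySem.Set.inter (pvBigramsA t) (pvBigramsA cat) ≠ []
      · have : ∃ b ∈ pvBg t, b ∈ pvBg cat := by
          obtain ⟨b, hb1, hb2⟩ := (pv_inter_ne_nil _ _).1 h2
          exact ⟨b, (mem_pvBigramsA b t).1 hb1, (mem_pvBigramsA b cat).1 hb2⟩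
        simp [h1, h2, pvP, this]
      · have : ¬ ∃ b ∈ pvBg t, b ∈ pvBg cat := by
          intro ⟨b, hb1, hb2⟩
          exact h2 ((pv_inter_ne_nil _ _).2
            ⟨b, (mem_pvBigramsA b t).2 hb1, (mem_pvBigramsA b cat).2 hb2⟩)
        simp [h1, h2, pvP, this]
  rw [hstep, PySem.List.foldl_append_if, List.map_id, List.nil_append]

theorem pv_inner (j : Int) : ∀ (bgs : List (String × String))
    (d : PySem.Dict (String × String) (PySem.Set Int)) (b : String × String) (i : Int),
    i ∈ (bgs.foldl (fun d bg => d.modify bg PySem.Set.empty (fun s => PySem.Set.add s j)) d).getD b PySem.Set.empty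
      ↔ i ∈ d.getD b PySem.Set.empty ∨ (i = j ∧ b ∈ bgs)
  | [], d, b, i => by simp
  | bg :: bgs, d, b, i => by
    rw [List.foldl_cons, pv_inner j bgs]
    rw [PySem.Dict.getD_modify]
    by_cases hb : b = bg
    · subst hb
      simp [PySem.Set.mem_add]
      try tauto
    · simp [hb]
      try tauto

theorem pv_outer : ∀ (L : List (Int × String))
    (d : PySem.Dict (String × String) (PySem.Set Int)) (b : String × String) (i : Int),
    i ∈ (L.foldl pvIndexStep d).getD b PySem.Set.empty
      ↔ i ∈ d.getD b PySem.Set.empty ∨ ∃ p ∈ L, i = p.1 ∧ b ∈ pvBigramsB p.2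
  | [], d, b, i => by simp
  | p :: L, d, b, i => by
    rw [List.foldl_cons, pv_outer L]
    unfold pvIndexStep
    rw [pv_inner p.1 (pvBigramsB p.2)]
    simp only [List.mem_cons]
    constructor
    · rintro ((h | ⟨hi, hb⟩) | ⟨q, hq, hi, hb⟩)
      · exact Or.inl h
      · exact Or.inr ⟨p, Or.inl rfl, hi, hb⟩
      · exact Or.inr ⟨q, Or.inr hq, hi, hb⟩
    · rintro (h | ⟨q, (rfl | hq), hi, hb⟩)
      · exact Or.inl (Or.inl h)
      · exact Or.inl (Or.inr ⟨hi, hb⟩)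
      · exact Or.inr ⟨q, hq, hi, hb⟩

theorem pv_unionFold {β : Type} (g : β → PySem.Set Int) :
    ∀ (l : List β) (s : PySem.Set Int) (i : Int),
    i ∈ l.foldl (fun h b => PySem.Set.union h (g b)) s ↔ i ∈ s ∨ ∃ b ∈ l, i ∈ g b
  | [], s, i => by simp
  | b :: l, s, i => by
    rw [List.foldl_cons, pv_unionFold g l]
    simp only [PySem.Set.mem_union, List.mem_cons]
    constructor
    · rintro ((h | h) | ⟨c, hc, hi⟩)
      · exact Or.inl h
      · exact Or.inr ⟨b, Or.inl rfl, h⟩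
      · exact Or.inr ⟨c, Or.inr hc, hi⟩
    · rintro (h | ⟨c, (rfl | hc), hi⟩)
      · exact Or.inl (Or.inl h)
      · exact Or.inl (Or.inr hi)
      · exact Or.inr ⟨c, hc, hi⟩

theorem pv_mem_hit (t : String) (cats : List String) (i : Int) :
    i ∈ pvHit t cats ↔
      ∃ b ∈ pvBg t, ∃ p ∈ PySem.List.enumerate cats 0, i = p.1 ∧ b ∈ pvBg p.2 := by
  unfold pvHit
  rw [pv_unionFold (fun bg => (pvIndex cats).getD bg PySem.Set.empty)]
  unfold pvIndex
  constructor
  · rintro (h | ⟨b, hb, hi⟩)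
    · simp [PySem.Set.empty] at h
    · rw [pv_outer] at hi
      rcases hi with h | ⟨p, hp, hi, hbp⟩
      · rw [PySem.Dict.getD_empty] at h
        simp [PySem.Set.empty] at h
      · refine ⟨b, ?_, p, hp, hi, ?_⟩
        · have hmem := (PySem.Set.mem_ofList _ _).1 hb
          rwa [pvBigramsB_eq] at hmem
        · rwa [pvBigramsB_eq] at hbp
  · rintro ⟨b, hb, p, hp, hi, hbp⟩
    refine Or.inr ⟨b, (PySem.Set.mem_ofList _ _).2 ?_, ?_⟩
    · rw [pvBigramsB_eq]; exact hb
    · rw [pv_outer]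
      exact Or.inr ⟨p, hp, hi, by rwa [pvBigramsB_eq]⟩

theorem pv_hit_at (t : String) (cats : List String) (k : Nat) (hk : k < cats.length) :
    ((0 : Int) + (k : Int)) ∈ pvHit t cats ↔ ∃ b ∈ pvBg t, b ∈ pvBg cats[k] := by
  rw [pv_mem_hit]
  constructor
  · rintro ⟨b, hb, p, hp, hi, hbp⟩
    obtain ⟨k', hk', rfl⟩ := (PySem.List.mem_enumerate_iff cats 0 p).1 hp
    have h2 : (0 : Int) + (k : Int) = 0 + (k' : Int) := hi
    have h3 : k = k' := by omega
    subst h3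
    exact ⟨b, hb, hbp⟩
  · rintro ⟨b, hb, hbk⟩
    refine ⟨b, hb, ((0 : Int) + (k : Int), cats[k]), ?_, rfl, hbk⟩
    exact (PySem.List.mem_enumerate_iff cats 0 _).2 ⟨k, hk, rfl⟩

theorem pv_filter_enum {α : Type} (q : Int × α → Bool) (p : α → Bool) :
    ∀ (xs : List α) (s : Int), (∀ pr ∈ PySem.List.enumerate xs s, q pr = p pr.2) →
      ((PySem.List.enumerate xs s).filter q).map (·.2) = xs.filter p
  | [], _, _ => rfl
  | x :: xs, s, h => by
    rw [PySem.List.enumerate_cons]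
    have hx : q (s, x) = p x := h (s, x) (by rw [PySem.List.enumerate_cons]; exact List.mem_cons_self)
    have ih := pv_filter_enum q p xs (s + 1) (fun pr hpr =>
      h pr (by rw [PySem.List.enumerate_cons]; exact List.mem_cons_of_mem _ hpr))
    by_cases hpx : p x = true
    · rw [List.filter_cons_of_pos (by rw [hx, hpx]), List.filter_cons_of_pos hpx,
        List.map_cons, ih]
    · rw [List.filter_cons_of_neg (by rw [hx]; exact hpx),
        List.filter_cons_of_neg hpx, ih]

theorem pvB_loop (t : String) (cats : List String) :
    (PySem.List.enumerate cats 0).foldl (fun related p =>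
      if p.1 ∈ pvHit t cats ∧ p.2 ≠ t then related ++ [p.2] else related) []
      = cats.filter (pvP t) := by
  have hstep : (fun (related : List String) (p : Int × String) =>
      if p.1 ∈ pvHit t cats ∧ p.2 ≠ t then related ++ [p.2] else related)
      = fun related p =>
        if (decide (p.1 ∈ pvHit t cats ∧ p.2 ≠ t)) = true then related ++ [(fun q : Int × String => q.2) p] else related := by
    funext related p
    by_cases h : p.1 ∈ pvHit t cats ∧ p.2 ≠ t <;> simp [h]
  rw [hstep, PySem.List.foldl_append_if, List.nil_append]
  apply pv_filter_enum
  intro pr hpr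
  obtain ⟨k, hk, rfl⟩ := (PySem.List.mem_enumerate_iff cats 0 pr).1 hpr
  simp only [pvP]
  rw [decide_eq_decide]
  constructor
  · rintro ⟨hmem, hne⟩
    exact ⟨hne, (pv_hit_at t cats k hk).1 hmem⟩
  · rintro ⟨hne, hsh⟩
    exact ⟨(pv_hit_at t cats k hk).2 hsh, hne⟩

-- ===== VERDICT (by name: the statement is the Claim_ definition above) =====
theorem find_related_categories_spec : Claim_equal_find_related_categories := by
  intro t cats _
  show find_related_categories t cats = find_related_categories_alt t cats
  simp only [find_related_categories, find_related_categories_alt]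
  rw [pvA_loop, pvB_loop]
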